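-- pv_equiv track=rewrite | github.com/pypi-data/pypi-mirror-402 | packages/quillsql/quillsql-2.2.8.tar.gz/quillsql-2.2.8/quillsql/utils/run_query_processes.py | remove_fields
-- ===== SOURCE A (Python) =====
-- def remove_fields(query_result, fields_to_remove):
--     if not isinstance(query_result, dict):
--         return query_result
--     fields = [
--         {"name": field["name"], "dataTypeID": field["dataTypeID"]}
--         for field in (query_result.get("fields") or [])
--         if field.get("name") not in fields_to_remove
--     ]
--     rows = []
--     for row in query_result.get("rows") or []:
--         if not isinstance(row, dict):
--             rows.append(row)
--             continue
--         filtered = dict(row)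
--         for field in fields_to_remove:
--             if field in filtered:
--                 del filtered[field]
--         rows.append(filtered)
--     return {"fields": fields, "rows": rows}
-- ===== SOURCE B (Python) =====
-- def remove_fields(query_result, fields_to_remove):
--     if not isinstance(query_result, dict):
--         return query_result
--     fields = list(query_result.get("fields") or [])
--     rows = list(query_result.get("rows") or [])
--     # staged whole-dataset passes: one pass over fields and rows per removal key
--     for f in fields_to_remove:
--         fields = [fd for fd in fields if fd.get("name") != f]
--         rows = [
--             r if not isinstance(r, dict)
--             else {k: v for k, v in r.items() if k != f}
--             for r in rows
--         ]
--     return {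
--         "fields": [{"name": fd["name"], "dataTypeID": fd["dataTypeID"]} for fd in fields],
--         "rows": rows,
--     }
-- ===== Notes on version B (the rewrite author's own statement) =====
-- stated objective: alternative
-- what changed: B swaps the loop nesting: instead of A's per-row inner loop over fields_to_remove with copy-and-delete, B makes one staged pass over the whole dataset per removal key (stripping that key from the fields list and from every row), and defers the fields projection to a final map; Pre_ excludes only inputs where A raises KeyError (a field dict missing 'name', or a kept one missing 'dataTypeID').
import Mathlib
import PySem

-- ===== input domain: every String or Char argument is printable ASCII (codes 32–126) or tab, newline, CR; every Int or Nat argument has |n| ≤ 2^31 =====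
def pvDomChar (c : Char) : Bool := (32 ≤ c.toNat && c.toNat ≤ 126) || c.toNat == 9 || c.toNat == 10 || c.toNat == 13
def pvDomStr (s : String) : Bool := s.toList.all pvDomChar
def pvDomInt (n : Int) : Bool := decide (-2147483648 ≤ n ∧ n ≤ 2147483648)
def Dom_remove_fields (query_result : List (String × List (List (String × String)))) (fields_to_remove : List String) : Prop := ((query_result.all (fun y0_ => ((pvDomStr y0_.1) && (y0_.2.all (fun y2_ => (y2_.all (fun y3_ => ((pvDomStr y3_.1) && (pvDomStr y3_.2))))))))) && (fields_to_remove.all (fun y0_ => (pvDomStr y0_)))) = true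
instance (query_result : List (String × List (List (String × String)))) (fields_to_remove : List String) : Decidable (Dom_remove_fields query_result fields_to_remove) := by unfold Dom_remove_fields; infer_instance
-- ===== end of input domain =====

-- B swaps the loop nesting: one staged pass over fields and all rows per removal key,
-- deferring the fields projection to the end (objective: alternative decomposition).

-- shared helpers: Python d.get(k) on an association-list dict (first match), and
-- (d.get(k) or []) for the outer query_result lookups
def pvGet? (d : List (String × String)) (k : String) : Option String :=
  (d.find? (fun p => p.1 == k)).map (fun p => p.2)

def pvLookup (qr : List (String × List (List (String × String)))) (k : String) :
    List (List (String × String)) :=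
  ((qr.find? (fun p => p.1 == k)).map (fun p => p.2)).getD []

-- A's comprehension filter: field.get("name") not in fields_to_remove
-- (a missing "name" gives Python None, which is never in a list of strings)
def pvKeepField (rm : List String) (f : List (String × String)) : Bool :=
  match pvGet? f "name" with
  | some s => !(rm.contains s)
  | none => true

-- {"name": field["name"], "dataTypeID": field["dataTypeID"]}; the .getD "" default
-- is never taken inside Pre_ (Python raises KeyError exactly there)
def pvMkField (f : List (String × String)) : List (String × String) :=
  [("name", (pvGet? f "name").getD ""), ("dataTypeID", (pvGet? f "dataTypeID").getD "")]

-- ===== PORT A =====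
-- the isinstance checks are always true under the declared dict types and are dropped
def remove_fields (query_result : List (String × List (List (String × String)))) (fields_to_remove : List String) : List (String × List (List (String × String))) :=
  let fields := (pvLookup query_result "fields").foldl
    (fun acc field => if pvKeepField fields_to_remove field then acc ++ [pvMkField field] else acc) []
  let rows := (pvLookup query_result "rows").foldl
    (fun acc row =>
      acc ++ [fields_to_remove.foldl
        (fun filtered field =>
          if filtered.any (fun p => p.1 == field)
          then filtered.filter (fun p => !(p.1 == field))  -- del filtered[field]
          else filtered)
        row])  -- filtered = dict(row): a copy of the dict
    []
  [("fields", fields), ("rows", rows)]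

-- ===== PORT B =====
-- B's 'for f in fields_to_remove' loop carries the (fields, rows) pair as state
def remove_fields_alt (query_result : List (String × List (List (String × String)))) (fields_to_remove : List String) : List (String × List (List (String × String))) :=
  let st := fields_to_remove.foldl
    (fun (st : List (List (String × String)) × List (List (String × String))) f =>
      (st.1.filter (fun fd => !(pvGet? fd "name" == some f)),
       st.2.map (fun r => r.filter (fun p => !(p.1 == f)))))
    (pvLookup query_result "fields", pvLookup query_result "rows")
  [("fields", st.1.map pvMkField), ("rows", st.2)]

-- ===== PRECONDITION & SPEC =====
-- Pre_ excludes exactly the inputs on which Python A raises KeyError: a field dict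
-- with no "name" key, or one whose kept name has no "dataTypeID" key.
def Pre_remove_fields (query_result : List (String × List (List (String × String)))) (fields_to_remove : List String) : Prop :=
  ((pvLookup query_result "fields").all (fun f =>
    match pvGet? f "name" with
    | none => false
    | some s => fields_to_remove.contains s || (pvGet? f "dataTypeID").isSome)) = true
instance (query_result : List (String × List (List (String × String)))) (fields_to_remove : List String) : Decidable (Pre_remove_fields query_result fields_to_remove) := by unfold Pre_remove_fields; infer_instance

def pvWitness_remove_fields : (List (String × List (List (String × String)))) × List String :=
  ([("fields", [[("name", "a"), ("dataTypeID", "1")], [("name", "b"), ("dataTypeID", "2")]]),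
    ("rows", [[("a", "x"), ("b", "y"), ("c", "z")]])], ["a"])

def Spec_remove_fields (query_result : List (String × List (List (String × String)))) (fields_to_remove : List String) (out : List (String × List (List (String × String)))) : Prop := out = remove_fields_alt query_result fields_to_remove
instance (query_result : List (String × List (List (String × String)))) (fields_to_remove : List String) (out : List (String × List (List (String × String)))) : Decidable (Spec_remove_fields query_result fields_to_remove out) := by unfold Spec_remove_fields; infer_instance

-- ===== CLAIM (what is proved, stated in full; the proofs are below) =====
def Claim_equal_remove_fields : Prop := ∀ (query_result : List (String × List (List (String × String)))) (fields_to_remove : List String), Dom_remove_fields query_result fields_to_remove → Pre_remove_fields query_result fields_to_remove → Spec_remove_fields query_result fields_to_remove (remove_fields query_result fields_to_remove)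

-- ===== LEMMAS AND PROOFS =====

-- A's comprehension loop 'acc ++ [g x] if p x' is filter-then-map
theorem pv_foldl_filter_map {α β : Type} (p : α → Bool) (g : α → β) :
    ∀ (xs : List α) (acc : List β),
      xs.foldl (fun a x => if p x then a ++ [g x] else a) acc = acc ++ (xs.filter p).map g := by
  intro xs
  induction xs with
  | nil => simp
  | cons x xs ih =>
    intro acc
    by_cases h : p x = true <;> simp [List.foldl_cons, h, ih]

-- A's append-one-per-element rows loop is a map
theorem pv_foldl_append_map {α β : Type} (g : α → β) :
    ∀ (xs : List α) (acc : List β),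
      xs.foldl (fun a x => a ++ [g x]) acc = acc ++ xs.map g := by
  intro xs
  induction xs with
  | nil => simp
  | cons x xs ih => intro acc; simp [List.foldl_cons, ih]

-- A's per-row delete loop over fields_to_remove equals one filter-in pass over the row
theorem pv_del_loop_eq_filter :
    ∀ (rm : List String) (row : List (String × String)),
      rm.foldl
        (fun filtered field =>
          if filtered.any (fun p => p.1 == field)
          then filtered.filter (fun p => !(p.1 == field))
          else filtered)
        row
      = row.filter (fun p => !(rm.contains p.1)) := by
  intro rm
  induction rm with
  | nil => intro row; simp
  | cons f rest ih =>
    intro row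
    have hstep :
        (if row.any (fun p => p.1 == f)
         then row.filter (fun p => !(p.1 == f))
         else row)
        = row.filter (fun p => !(p.1 == f)) := by
      by_cases h : row.any (fun p => p.1 == f) = true
      · simp [h]
      · simp only [h, if_neg Bool.false_ne_true]
        symm
        apply List.filter_eq_self.mpr
        intro a ha
        simp only [List.any_eq_true, not_exists] at h
        have := h a
        simp [ha] at this
        simp [this]
    rw [List.foldl_cons, hstep, ih, List.filter_filter]
    apply List.filter_congr
    intro p _
    by_cases h : p.1 = f <;> simp [h, Bool.and_comm]

-- B's staged fold over fields_to_remove equals the one-shot filters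
theorem pv_staged_fold_eq :
    ∀ (rm : List String) (fields rows : List (List (String × String))),
      rm.foldl
        (fun (st : List (List (String × String)) × List (List (String × String))) f =>
          (st.1.filter (fun fd => !(pvGet? fd "name" == some f)),
           st.2.map (fun r => r.filter (fun p => !(p.1 == f)))))
        (fields, rows)
      = (fields.filter (pvKeepField rm),
         rows.map (fun r => r.filter (fun p => !(rm.contains p.1)))) := by
  intro rm
  induction rm with
  | nil =>
    intro fields rows
    simp only [List.foldl_nil, Prod.mk.injEq]
    constructor
    · symm; apply List.filter_eq_self.mpr
      intro fd _; unfold pvKeepField; cases pvGet? fd "name" <;> simp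
    · symm
      calc rows.map (fun r => r.filter (fun p => !(([] : List String).contains p.1)))
          = rows.map id := by
            apply List.map_congr_left; intro r _
            simp
        _ = rows := List.map_id rows
  | cons f rest ih =>
    intro fields rows
    rw [List.foldl_cons, ih, List.filter_filter, List.map_map]
    simp only [Prod.mk.injEq]
    constructor
    · apply List.filter_congr
      intro fd _
      unfold pvKeepField
      cases pvGet? fd "name" with
      | none => simp
      | some s =>
        simp only [List.contains_cons]
        by_cases hs : s = f <;> simp [hs, Bool.and_comm]
    · apply List.map_congr_left
      intro r _
      simp only [Function.comp, List.filter_filter]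
      apply List.filter_congr
      intro p _
      by_cases h : p.1 = f <;> simp [h, Bool.and_comm]

-- ===== VERDICT (by name: the statement is the Claim_ definition above) =====
theorem remove_fields_spec : Claim_equal_remove_fields := by
  intro qr rm _ _
  unfold Spec_remove_fields remove_fields remove_fields_alt
  rw [pv_foldl_filter_map, pv_foldl_append_map, pv_staged_fold_eq]
  simp only [List.nil_append, pv_del_loop_eq_filter]
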